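-- pv_equiv track=rewrite | github.com/amazon-science/doc-mt-metrics | Prism/add_context.py | add_context
-- ===== SOURCE A (Python) =====
-- from typing import List
--
-- def add_context(orig_txt: List[str], context: List[str], doc_ids: List[str], sep_token: str = "</s>",
--                 ws: int = 2) -> List[str]:
--     """Function that adds the previous sentences as context to the current sentence, respecting document boundaries
--     :param orig_txt: the original text
--     :param context: the text from which the context will be taken (same as orig_txt for source/reference)
--     :param doc_ids: the document where each segment belongs to
--     :param sep_token: the separator token of the tokenizer for the specific model
--     :param ws: the window size, maximum of the previous sentences to be considered as context
--     :return: the original text augmented with context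
--     """
--     if not (len(orig_txt) == len(context) == len(doc_ids)):
--         raise Exception(f'Lengths should match: len(orig_txt)={len(orig_txt)}, len(context)={len(context)}, len(doc_ids)={len(doc_ids)}')
--     i, k = 0, 0
--     augm_txt = []
--     doc_id = doc_ids[0]
--     while i < len(orig_txt):
--         if doc_ids[i] == doc_id:
--             context_window = context[i - min(k, ws):i]
--             augm_txt.append(" {} ".format(sep_token).join(context_window + [orig_txt[i]]))
--             i += 1
--         else:
--             doc_id = doc_ids[i]
--             k = -1
--         k += 1
--     return augm_txt
-- ===== SOURCE B (Python) =====
-- from typing import List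
--
-- def add_context(orig_txt: List[str], context: List[str], doc_ids: List[str], sep_token: str = "</s>",
--                 ws: int = 2) -> List[str]:
--     if not (len(orig_txt) == len(context) == len(doc_ids)):
--         raise Exception(f'Lengths should match: len(orig_txt)={len(orig_txt)}, len(context)={len(context)}, len(doc_ids)={len(doc_ids)}')
--     n = len(orig_txt)
--     # pass 1: run start index of each position (document boundary detection)
--     starts = []
--     cur = 0
--     for i in range(n):
--         if i > 0 and doc_ids[i] != doc_ids[i - 1]:
--             cur = i
--         starts.append(cur)
--     # pass 2: window join per position
--     sep = " {} ".format(sep_token)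
--     return [sep.join(context[max(starts[i], i - ws):i] + [orig_txt[i]]) for i in range(n)]
-- ===== Notes on version B (the rewrite author's own statement) =====
-- stated objective: alternative
-- what changed: Replaces A's single while-loop with a k-counter that resets and a non-advancing reprocess step by two clean passes: first compute each position's document-run start index, then build each augmented sentence by joining context[max(run_start, i-ws):i] with the sentence.
import Mathlib
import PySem

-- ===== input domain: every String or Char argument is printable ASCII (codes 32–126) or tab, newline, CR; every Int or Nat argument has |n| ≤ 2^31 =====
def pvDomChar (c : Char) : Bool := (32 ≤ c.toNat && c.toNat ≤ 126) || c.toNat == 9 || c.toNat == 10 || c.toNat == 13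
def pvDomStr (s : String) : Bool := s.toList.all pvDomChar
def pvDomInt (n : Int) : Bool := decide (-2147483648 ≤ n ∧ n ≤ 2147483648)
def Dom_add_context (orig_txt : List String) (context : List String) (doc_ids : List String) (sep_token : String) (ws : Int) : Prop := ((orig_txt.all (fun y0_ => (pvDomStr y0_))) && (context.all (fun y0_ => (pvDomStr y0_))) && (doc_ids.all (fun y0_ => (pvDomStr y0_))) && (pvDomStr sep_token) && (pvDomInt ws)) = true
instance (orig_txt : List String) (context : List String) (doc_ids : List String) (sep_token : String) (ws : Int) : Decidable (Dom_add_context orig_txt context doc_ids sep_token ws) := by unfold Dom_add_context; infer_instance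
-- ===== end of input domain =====

-- B replaces A's while-loop with k-counter reset by two passes (run starts, then window joins);
-- same return value on all non-raising inputs, and B returns [] where A raises IndexError on empty input.

-- ===== PORT A =====
-- the while loop of A, state (i, k, doc_id, augm_txt); list accesses in range under Pre_ (pyGetD exact there)
def addContextLoopA (orig_txt : List String) (context : List String) (doc_ids : List String)
    (sep_token : String) (ws : Int) (i k : Int) (doc_id : String) (acc : List String) : List String :=
  if _h : i < (orig_txt.length : Int) then
    if _hm : PySem.List.pyGetD doc_ids i "" = doc_id then
      addContextLoopA orig_txt context doc_ids sep_token ws (i + 1) (k + 1) doc_id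
        (acc ++ [PySem.Str.join (" " ++ sep_token ++ " ")
          (PySem.List.slice context (some (i - min k ws)) (some i) ++ [PySem.List.pyGetD orig_txt i ""])])
    else
      addContextLoopA orig_txt context doc_ids sep_token ws i 0 (PySem.List.pyGetD doc_ids i "") acc
  else acc
termination_by (((orig_txt.length : Int) - i).toNat,
  if PySem.List.pyGetD doc_ids i "" = doc_id then 0 else 1)
decreasing_by
  · apply Prod.Lex.left; omega
  · apply Prod.Lex.right'
    · omega
    · simp [_hm]

def add_context (orig_txt : List String) (context : List String) (doc_ids : List String) (sep_token : String) (ws : Int) : List String :=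
  addContextLoopA orig_txt context doc_ids sep_token ws 0 0 (PySem.List.pyGetD doc_ids 0 "") []

-- ===== PORT B =====
def add_context_alt (orig_txt : List String) (context : List String) (doc_ids : List String) (sep_token : String) (ws : Int) : List String :=
  let n : Int := (orig_txt.length : Int)
  -- pass 1: run start index of each position
  let st := (PySem.List.pyRange 0 n 1).foldl
    (fun (s : Int × List Int) i =>
      let cur := if 0 < i ∧ PySem.List.pyGetD doc_ids i "" ≠ PySem.List.pyGetD doc_ids (i - 1) ""
                 then i else s.1
      (cur, s.2 ++ [cur])) ((0 : Int), ([] : List Int))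
  let starts := st.2
  -- pass 2: window join per position
  let sep := " " ++ sep_token ++ " "
  (PySem.List.pyRange 0 n 1).map (fun i =>
    PySem.Str.join sep
      (PySem.List.slice context (some (max (PySem.List.pyGetD starts i 0) (i - ws))) (some i)
        ++ [PySem.List.pyGetD orig_txt i ""]))

-- ===== PRECONDITION & SPEC =====
-- Pre_ excludes only inputs where Python A raises: mismatched lengths (Exception) and the all-empty input (IndexError on doc_ids[0]).
def Pre_add_context (orig_txt : List String) (context : List String) (doc_ids : List String) (sep_token : String) (ws : Int) : Prop :=
  orig_txt.length = context.length ∧ orig_txt.length = doc_ids.length ∧ orig_txt ≠ []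
instance (orig_txt : List String) (context : List String) (doc_ids : List String) (sep_token : String) (ws : Int) : Decidable (Pre_add_context orig_txt context doc_ids sep_token ws) := by unfold Pre_add_context; infer_instance
def pvWitness_add_context : List String × List String × List String × String × Int :=
  (["a", "b", "c"], ["x", "y", "z"], ["d1", "d1", "d2"], "</s>", 2)

def Spec_add_context (orig_txt : List String) (context : List String) (doc_ids : List String) (sep_token : String) (ws : Int) (out : List String) : Prop := out = add_context_alt orig_txt context doc_ids sep_token ws
instance (orig_txt : List String) (context : List String) (doc_ids : List String) (sep_token : String) (ws : Int) (out : List String) : Decidable (Spec_add_context orig_txt context doc_ids sep_token ws out) := by unfold Spec_add_context; infer_instance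

-- ===== CLAIM (what is proved, stated in full; the proofs are below) =====
def Claim_equal_add_context : Prop := ∀ (orig_txt : List String) (context : List String) (doc_ids : List String) (sep_token : String) (ws : Int), Dom_add_context orig_txt context doc_ids sep_token ws → Pre_add_context orig_txt context doc_ids sep_token ws → Spec_add_context orig_txt context doc_ids sep_token ws (add_context orig_txt context doc_ids sep_token ws)
-- ===== LEMMAS AND PROOFS =====

-- run start of position i in doc_ids (proof-side characterisation)
def rStart (doc_ids : List String) : Nat → Nat
  | 0 => 0
  | n + 1 => if PySem.List.pyGetD doc_ids ((n : Int) + 1) "" = PySem.List.pyGetD doc_ids (n : Int) ""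
             then rStart doc_ids n else n + 1

theorem rStart_le (doc_ids : List String) (i : Nat) : rStart doc_ids i ≤ i := by
  induction i with
  | zero => simp [rStart]
  | succ n ih => unfold rStart; split <;> omega

-- the element both programs append for position j
def elt (orig_txt context doc_ids : List String) (sep_token : String) (ws : Int) (j : Nat) : String :=
  PySem.Str.join (" " ++ sep_token ++ " ")
    (PySem.List.slice context (some (max ((rStart doc_ids j : Nat) : Int) ((j : Int) - ws))) (some (j : Int))
      ++ [PySem.List.pyGetD orig_txt (j : Int) ""])

theorem loopA_eq (orig_txt context doc_ids : List String) (sep_token : String) (ws : Int) :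
    ∀ c i k d acc, orig_txt.length - i = c → i ≤ orig_txt.length →
    ((i = 0 ∧ d = PySem.List.pyGetD doc_ids 0 "" ∧ k = 0) ∨
     (0 < i ∧ d = PySem.List.pyGetD doc_ids ((i : Int) - 1) "" ∧ k = (i : Int) - (rStart doc_ids (i - 1) : Nat)) ∨
     (i < orig_txt.length ∧ d = PySem.List.pyGetD doc_ids (i : Int) "" ∧ k = (i : Int) - (rStart doc_ids i : Nat))) →
    addContextLoopA orig_txt context doc_ids sep_token ws (i : Int) k d acc =
      acc ++ (List.range' i (orig_txt.length - i)).map (elt orig_txt context doc_ids sep_token ws) := by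
  intro c
  induction c using Nat.strong_induction_on with
  | _ c IH =>
    intro i k d acc hc hle hinv
    by_cases hn : i < orig_txt.length
    · have hrle := rStart_le doc_ids i
      have step : ∀ k d, d = PySem.List.pyGetD doc_ids (i : Int) "" →
          k = (i : Int) - (rStart doc_ids i : Nat) →
          addContextLoopA orig_txt context doc_ids sep_token ws (i : Int) k d acc =
            acc ++ (List.range' i (orig_txt.length - i)).map (elt orig_txt context doc_ids sep_token ws) := by
        intro k d hd hk
        rw [addContextLoopA]
        rw [dif_pos (by exact_mod_cast hn), dif_pos hd.symm]
        have hicast : ((i : Int) + 1) = ((i + 1 : Nat) : Int) := by push_cast; ring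
        rw [hicast]
        rw [IH (orig_txt.length - (i + 1)) (by omega) (i + 1) (k + 1) d _ rfl (by omega)
          (Or.inr (Or.inl ⟨by omega, by simpa using hd, by
            have : (i + 1) - 1 = i := by omega
            rw [this]; push_cast; omega⟩))]
        have hidx : (i : Int) - min k ws = max ((rStart doc_ids i : Nat) : Int) ((i : Int) - ws) := by
          subst hk; omega
        have helt : PySem.Str.join (" " ++ sep_token ++ " ")
            (PySem.List.slice context (some ((i : Int) - min k ws)) (some (i : Int))
              ++ [PySem.List.pyGetD orig_txt (i : Int) ""]) = elt orig_txt context doc_ids sep_token ws i := by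
          unfold elt
          rw [hidx]
        rw [helt]
        have hr : orig_txt.length - i = (orig_txt.length - (i + 1)) + 1 := by omega
        rw [hr, List.range'_succ, List.map_cons]
        simp
      rcases hinv with ⟨h0, hd, hk⟩ | ⟨hpos, hd, hk⟩ | ⟨_, hd, hk⟩
      · subst h0
        exact step k d (by simpa using hd) (by simp [rStart, hk])
      · by_cases heq : PySem.List.pyGetD doc_ids (i : Int) "" = PySem.List.pyGetD doc_ids ((i : Int) - 1) ""
        · apply step k d (by rw [hd, heq])
          have hi : i = (i - 1) + 1 := by omega
          rw [hk, hi, rStart]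
          have hc1 : (((i - 1 : Nat) : Int) + 1) = (i : Int) := by omega
          have hc2 : ((i - 1 : Nat) : Int) = (i : Int) - 1 := by omega
          rw [hc1, hc2, if_pos heq, ← hi]
        · rw [addContextLoopA, dif_pos (by exact_mod_cast hn),
            dif_neg (by rw [hd]; exact heq)]
          apply step 0 _ rfl
          have hi : i = (i - 1) + 1 := by omega
          rw [hi, rStart]
          have hc1 : (((i - 1 : Nat) : Int) + 1) = (i : Int) := by omega
          have hc2 : ((i - 1 : Nat) : Int) = (i : Int) - 1 := by omega
          rw [hc1, hc2, if_neg heq, ← hi]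
          omega
      · exact step k d hd hk
    · have hi : i = orig_txt.length := by omega
      rw [addContextLoopA, dif_neg (by exact_mod_cast hn)]
      simp [hi]

-- B's first pass computes exactly (rStart 0, …, rStart (n-1))
theorem foldB_eq (doc_ids : List String) :
    ∀ n : Nat, (PySem.List.pyRange 0 (n : Int) 1).foldl
      (fun (s : Int × List Int) i =>
        let cur := if 0 < i ∧ PySem.List.pyGetD doc_ids i "" ≠ PySem.List.pyGetD doc_ids (i - 1) ""
                   then i else s.1
        (cur, s.2 ++ [cur])) ((0 : Int), ([] : List Int)) =
      (((rStart doc_ids (n - 1) : Nat) : Int),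
        (List.range n).map (fun j => ((rStart doc_ids j : Nat) : Int))) := by
  intro n
  induction n with
  | zero => simp [PySem.List.pyRange, rStart]
  | succ m ih =>
    have hsplit : PySem.List.pyRange 0 ((m + 1 : Nat) : Int) 1 =
        PySem.List.pyRange 0 (m : Int) 1 ++ [(m : Int)] := by
      have := PySem.List.pyRange_one_succ_right (a := 0) (b := (m : Int)) (h := by omega)
      simpa using this
    rw [hsplit, List.foldl_append, ih]
    simp only [List.foldl_cons, List.foldl_nil]
    have hcur : (if 0 < (m : Int) ∧ PySem.List.pyGetD doc_ids (m : Int) "" ≠ PySem.List.pyGetD doc_ids ((m : Int) - 1) ""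
        then (m : Int) else ((rStart doc_ids (m - 1) : Nat) : Int)) = ((rStart doc_ids m : Nat) : Int) := by
      rcases Nat.eq_zero_or_pos m with hm | hm
      · subst hm; simp [rStart]
      · have hms : m = (m - 1) + 1 := by omega
        have hrS : rStart doc_ids m =
            if PySem.List.pyGetD doc_ids (m : Int) "" = PySem.List.pyGetD doc_ids ((m : Int) - 1) ""
            then rStart doc_ids (m - 1) else m := by
          conv_lhs => rw [hms, rStart]
          have e1 : (((m - 1 : Nat) : Int)) + 1 = (m : Int) := by omega
          have e2 : ((m - 1 : Nat) : Int) = (m : Int) - 1 := by omega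
          rw [e1, e2, ← hms]
        by_cases h : PySem.List.pyGetD doc_ids (m : Int) "" = PySem.List.pyGetD doc_ids ((m : Int) - 1) ""
        · rw [if_neg (by tauto), hrS, if_pos h]
        · rw [if_pos ⟨by exact_mod_cast hm, h⟩, hrS, if_neg h]
    rw [hcur, List.range_succ, List.map_append, List.map_singleton]
    simp

theorem altB_eq (orig_txt context doc_ids : List String) (sep_token : String) (ws : Int) :
    add_context_alt orig_txt context doc_ids sep_token ws =
      (List.range orig_txt.length).map (elt orig_txt context doc_ids sep_token ws) := by
  unfold add_context_alt
  simp only [foldB_eq]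
  rw [PySem.List.pyRange_zero_natCast]
  rw [List.map_map]
  apply List.map_congr_left
  intro j hj
  simp only [List.mem_range] at hj
  unfold elt
  simp only [Function.comp]
  congr 2
  rw [PySem.List.pyGetD_natCast, List.getD_eq_getElem?_getD]
  simp [hj]

theorem range'_zero_eq_range (n : Nat) : List.range' 0 n = List.range n := by
  simp [List.range_eq_range']

-- ===== VERDICT (by name: the statement is the Claim_ definition above) =====
theorem add_context_spec : Claim_equal_add_context := by
  intro orig_txt context doc_ids sep_token ws _hdom hpre
  unfold Spec_add_context
  unfold add_context
  have h := loopA_eq orig_txt context doc_ids sep_token ws orig_txt.length 0 0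
      (PySem.List.pyGetD doc_ids 0 "") [] (by omega) (by omega) (Or.inl ⟨rfl, rfl, rfl⟩)
  rw [altB_eq]
  simpa [range'_zero_eq_range] using h
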